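-- pv_equiv track=rewrite | github.com/HongsinLee/ATUnlearning | utils.py | split_class_data
-- ===== SOURCE A (Python) =====
-- def split_class_data(dataset, forget_class, num_forget):
--     forget_index = []
--     class_remain_index = []
--     remain_index = []
--     sum = 0
--     for i, (data, target) in enumerate(dataset):
--         if target == forget_class and sum < num_forget:
--             forget_index.append(i)
--             sum += 1
--         elif target == forget_class and sum >= num_forget:
--             class_remain_index.append(i)
--             remain_index.append(i)
--             sum += 1
--         else:
--             remain_index.append(i)
--     return forget_index, remain_index, class_remain_index
-- ===== SOURCE B (Python) =====
-- def split_class_data(dataset, forget_class, num_forget):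
--     mat = list(dataset)
--     positions = [i for i, (_, target) in enumerate(mat) if target == forget_class]
--     k = max(num_forget, 0)
--     forget_index = positions[:k]
--     class_remain_index = positions[k:]
--     forget_set = set(forget_index)
--     remain_index = [i for i in range(len(mat)) if i not in forget_set]
--     return forget_index, remain_index, class_remain_index
-- ===== Notes on version B (the rewrite author's own statement) =====
-- stated objective: simpler
-- what changed: Replaces A's single stateful counter loop with four branches by a declarative decomposition: collect the ordered forget-class positions once, slice them into forget/class-remain buckets, and rebuild remain as all indices not in the forget set.
import Mathlib
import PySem

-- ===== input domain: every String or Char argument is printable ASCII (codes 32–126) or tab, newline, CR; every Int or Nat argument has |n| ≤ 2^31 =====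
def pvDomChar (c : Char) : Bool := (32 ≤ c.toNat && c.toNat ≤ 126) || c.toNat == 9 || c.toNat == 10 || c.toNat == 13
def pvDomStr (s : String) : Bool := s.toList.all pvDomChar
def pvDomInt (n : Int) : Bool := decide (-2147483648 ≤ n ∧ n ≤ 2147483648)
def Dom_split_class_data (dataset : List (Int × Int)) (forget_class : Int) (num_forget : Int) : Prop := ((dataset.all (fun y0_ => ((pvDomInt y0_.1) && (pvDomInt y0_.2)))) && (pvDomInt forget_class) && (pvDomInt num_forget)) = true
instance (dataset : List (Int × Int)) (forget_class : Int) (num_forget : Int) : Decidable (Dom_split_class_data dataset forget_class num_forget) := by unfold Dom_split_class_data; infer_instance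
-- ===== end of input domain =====

-- B replaces A's stateful counter loop by collect-positions / slice / rebuild-remain (objective: simpler decomposition; same return value, same cost).


-- ===== PORT A =====
-- A's loop: for i,(data,target) in enumerate(dataset), with counter `sum`; structural recursion on the list carrying (i, sum).
def splitGoA (fc nf : Int) : List (Int × Int) → Int → Int → List Int × List Int × List Int
  | [], _, _ => ([], [], [])
  | (_, t) :: rest, i, s =>
    if t = fc ∧ s < nf then
      let p := splitGoA fc nf rest (i + 1) (s + 1)
      (i :: p.1, p.2.1, p.2.2)
    else if t = fc ∧ nf ≤ s then
      let p := splitGoA fc nf rest (i + 1) (s + 1)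
      (p.1, i :: p.2.1, i :: p.2.2)
    else
      let p := splitGoA fc nf rest (i + 1) s
      (p.1, i :: p.2.1, p.2.2)

def split_class_data (dataset : List (Int × Int)) (forget_class : Int) (num_forget : Int) : List Int × List Int × List Int :=
  splitGoA forget_class num_forget dataset 0 0

-- ===== PORT B =====
def split_class_data_alt (dataset : List (Int × Int)) (forget_class : Int) (num_forget : Int) : List Int × List Int × List Int :=
  let mat := dataset
  let positions := ((PySem.List.enumerate mat 0).filter (fun p => p.2.2 == forget_class)).map (fun p => p.1)
  let k := max num_forget 0
  let forget_index := positions.take k.toNat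
  let class_remain_index := positions.drop k.toNat
  let remain_index := ((List.range mat.length).map Int.ofNat).filter (fun i => !(forget_index.contains i))
  (forget_index, remain_index, class_remain_index)

-- ===== PRECONDITION & SPEC =====
def Spec_split_class_data (dataset : List (Int × Int)) (forget_class : Int) (num_forget : Int) (out : List Int × List Int × List Int) : Prop := out = split_class_data_alt dataset forget_class num_forget
instance (dataset : List (Int × Int)) (forget_class : Int) (num_forget : Int) (out : List Int × List Int × List Int) : Decidable (Spec_split_class_data dataset forget_class num_forget out) := by unfold Spec_split_class_data; infer_instance

-- ===== CLAIM (what is proved, stated in full; the proofs are below) =====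
def Claim_equal_split_class_data : Prop := ∀ (dataset : List (Int × Int)) (forget_class : Int) (num_forget : Int), Dom_split_class_data dataset forget_class num_forget → Spec_split_class_data dataset forget_class num_forget (split_class_data dataset forget_class num_forget)

-- ===== LEMMAS AND PROOFS =====

-- ordered list of positions (starting at index i) whose target equals fc
def posFrom (fc : Int) : List (Int × Int) → Int → List Int
  | [], _ => []
  | (_, t) :: rest, i => if t = fc then i :: posFrom fc rest (i + 1) else posFrom fc rest (i + 1)

-- [i, i+1, …, i+n-1]
def irange : Int → Nat → List Int
  | _, 0 => []
  | i, n + 1 => i :: irange (i + 1) n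

theorem mem_posFrom_le (fc : Int) (l : List (Int × Int)) (i x : Int) (h : x ∈ posFrom fc l i) : i ≤ x := by
  induction l generalizing i with
  | nil => simp [posFrom] at h
  | cons hd tl ih =>
    simp only [posFrom] at h
    split at h
    · rcases List.mem_cons.1 h with h | h
      · omega
      · have := ih (i + 1) h; omega
    · have := ih (i + 1) h; omega

theorem mem_irange_le (i x : Int) (n : Nat) (h : x ∈ irange i n) : i ≤ x := by
  induction n generalizing i with
  | zero => simp [irange] at h
  | succ n ih =>
    rcases List.mem_cons.1 h with h | h
    · omega
    · have := ih (i + 1) h; omega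

theorem splitGoA_eq (fc nf : Int) (l : List (Int × Int)) (i s : Int) :
    splitGoA fc nf l i s =
      ((posFrom fc l i).take (nf - s).toNat,
       (irange i l.length).filter (fun j => !(((posFrom fc l i).take (nf - s).toNat).contains j)),
       (posFrom fc l i).drop (nf - s).toNat) := by
  induction l generalizing i s with
  | nil => simp [splitGoA, posFrom, irange]
  | cons hd tl ih =>
    obtain ⟨d, t⟩ := hd
    simp only [splitGoA, List.length_cons, irange, ih]
    split_ifs with h1 h2
    · obtain ⟨ht, hs⟩ := h1
      subst ht
      have hk : (nf - s).toNat = (nf - (s + 1)).toNat + 1 := by omega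
      simp only [posFrom, if_true, hk, List.take_succ_cons,
        List.drop_succ_cons, Prod.mk.injEq]
      refine ⟨trivial, ?_, trivial⟩
      rw [List.filter_cons]
      have hcont : ((i :: List.take (nf - (s + 1)).toNat (posFrom t tl (i + 1))).contains i) = true := by
        simp
      rw [hcont]
      simp only [Bool.not_true]
      rw [if_neg (by simp)]
      apply List.filter_congr
      intro j hj
      have hj1 : i + 1 ≤ j := mem_irange_le _ _ _ hj
      have h2 : (j == i) = false := by simp; omega
      simp only [List.contains_cons, h2, Bool.false_or]
    · obtain ⟨ht, hs⟩ := h2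
      subst ht
      have hk : (nf - s).toNat = 0 := by omega
      have hk1 : (nf - (s + 1)).toNat = 0 := by omega
      simp only [posFrom, if_true, hk, hk1, List.take_zero,
        List.drop_zero, Prod.mk.injEq]
      refine ⟨trivial, ?_, trivial⟩
      rw [List.filter_cons]
      simp
    · have ht : t ≠ fc := by
        intro h
        rcases lt_or_ge s nf with h' | h'
        · exact h1 ⟨h, h'⟩
        · exact h2 ⟨h, h'⟩
      simp only [posFrom]
      rw [if_neg ht]
      simp only [Prod.mk.injEq]
      refine ⟨trivial, ?_, trivial⟩
      rw [List.filter_cons]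
      have hni : ((List.take (nf - s).toNat (posFrom fc tl (i + 1))).contains i) = false := by
        by_contra hcon
        have hmem : i ∈ List.take (nf - s).toNat (posFrom fc tl (i + 1)) := by
          simpa using hcon
        have := mem_posFrom_le fc tl (i + 1) i (List.mem_of_mem_take hmem)
        omega
      simp only [hni]
      simp

theorem posFrom_eq_enum (fc : Int) (l : List (Int × Int)) (i : Int) :
    ((PySem.List.enumerate l i).filter (fun p => p.2.2 == fc)).map (fun p => p.1) = posFrom fc l i := by
  induction l generalizing i with
  | nil => simp [PySem.List.enumerate_nil, posFrom]
  | cons hd tl ih =>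
    obtain ⟨d, t⟩ := hd
    rw [PySem.List.enumerate_cons]
    by_cases ht : t = fc
    · simp [ht, posFrom, ih]
    · simp [ht, posFrom, ih]

theorem irange_eq_range (n : Nat) (i : Int) :
    irange i n = (List.range n).map (fun j => i + Int.ofNat j) := by
  induction n generalizing i with
  | zero => simp [irange]
  | succ n ih =>
    rw [List.range_succ_eq_map, List.map_cons, List.map_map]
    show i :: irange (i + 1) n = _
    rw [ih]
    congr 1
    · simp
    · apply List.map_congr_left
      intro j hj
      simp only [Function.comp, Int.ofNat_eq_natCast]
      push_cast
      ring

-- ===== VERDICT (by name: the statement is the Claim_ definition above) =====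
theorem split_class_data_spec : Claim_equal_split_class_data := by
  intro dataset fc nf _
  unfold Spec_split_class_data split_class_data split_class_data_alt
  have hk : (nf - 0).toNat = (max nf 0).toNat := by omega
  rw [splitGoA_eq, hk]
  simp only [posFrom_eq_enum, irange_eq_range, zero_add]
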